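-- pv_equiv track=rewrite | github.com/aeebbr/Algorithm | 2024/11/prog_132265_롤케이크자르기.py | solution
-- ===== SOURCE A (Python) =====
-- from collections import deque
--
-- def solution(topping):
--     answer = 0
--     slice_1 = deque()
--     slice_2 = deque(topping)
--     dic_1 = {}
--     dic_2 = {}
--
--     for e in slice_2:
--         if e in dic_2:
--             dic_2[e] +=1
--         else:
--             dic_2[e] =1
--
--     for i in range(len(topping)-1):
--         front = slice_2.popleft()
--         slice_1.append(front)
--
--         # slice_1 삽입
--         if front not in dic_1:
--             dic_1[front] = 1
--         else:
--             dic_1[front] += 1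
--
--         # slice_2 제거
--         dic_2[front] -= 1
--         if dic_2[front] == 0:
--             del dic_2[front]
--
--         if len(dic_1) == len(dic_2):
--             answer += 1
--
--     return answer
-- ===== SOURCE B (Python) =====
-- def solution(topping):
--     # suffix pass: right[i] = number of distinct toppings in topping[i:]
--     right = [0]  # right[len(topping)] = 0; built back-to-front
--     seen = set()
--     for x in reversed(topping):
--         seen.add(x)
--         right.append(len(seen))
--     right.reverse()
--     # forward pass: grow the left distinct set and compare with the table
--     left = set()
--     answer = 0
--     for i in range(len(topping) - 1):
--         left.add(topping[i])
--         if len(left) == right[i + 1]: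
--             answer += 1
--     return answer
-- ===== Notes on version B (the rewrite author's own statement) =====
-- stated objective: alternative
-- what changed: A sweeps once while mutating a decremented counter dict and a growing counter dict, comparing dict sizes at each cut; B instead precomputes a suffix table right[i] of distinct counts in a backward pass with a growing set, then a separate forward pass grows a left set and compares its size with the table entry.
import Mathlib
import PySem

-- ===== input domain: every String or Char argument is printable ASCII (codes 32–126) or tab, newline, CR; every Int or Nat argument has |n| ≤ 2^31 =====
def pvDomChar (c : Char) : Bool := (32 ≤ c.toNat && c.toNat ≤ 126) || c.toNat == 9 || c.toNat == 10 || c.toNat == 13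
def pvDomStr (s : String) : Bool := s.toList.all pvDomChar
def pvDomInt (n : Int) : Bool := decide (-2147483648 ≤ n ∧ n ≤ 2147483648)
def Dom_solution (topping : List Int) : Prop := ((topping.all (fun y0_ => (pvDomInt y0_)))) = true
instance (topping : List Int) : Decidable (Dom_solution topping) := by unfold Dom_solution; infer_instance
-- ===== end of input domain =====

-- B replaces A's rolling decremented counter by a precomputed suffix table of distinct
-- counts plus a single forward pass over growing left sets (objective: alternative).

-- ===== PORT A =====
-- A: build a counter of all toppings (dic_2), then sweep left-to-right moving each
-- element from slice_2/dic_2 into slice_1/dic_1, comparing dict sizes at each cut.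
def solution (topping : List Int) : Int :=
  let dic2 : PySem.Dict Int Int :=
    topping.foldl (fun d e =>
      if d.contains e then d.insert e (d.getD e 0 + 1) else d.insert e 1)
      PySem.Dict.empty
  let st :=
    (PySem.List.pyRange 0 ((topping.length : Int) - 1) 1).foldl
      (fun (st : Int × List Int × List Int × PySem.Dict Int Int × PySem.Dict Int Int) _ =>
        let answer := st.1
        let slice1 := st.2.1
        let slice2 := st.2.2.1
        let dic1 := st.2.2.2.1
        let dic2 := st.2.2.2.2
        let front := slice2.headD 0          -- popleft: slice2 is nonempty at every iteration
        let slice2 := slice2.tail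
        let slice1 := slice1 ++ [front]
        let dic1 := if !(dic1.contains front) then dic1.insert front 1
                    else dic1.insert front (dic1.getD front 0 + 1)
        let dic2 := dic2.modify front 0 (· - 1)   -- dic_2[front] -= 1; front is always a key here
        let dic2 := if dic2.getD front 0 == 0 then dic2.erase front else dic2
        let answer := if dic1.size == dic2.size then answer + 1 else answer
        (answer, slice1, slice2, dic1, dic2))
      (0, ([], topping, PySem.Dict.empty, dic2))
  st.1

-- ===== PORT B =====
-- B: backward pass builds right[i] = number of distinct toppings in topping[i:],
-- then a forward pass grows the left distinct set and compares with the table.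
def solution_alt (topping : List Int) : Int :=
  let bp :=
    topping.reverse.foldl
      (fun (st : List Int × PySem.Set Int) x =>
        let seen := PySem.Set.add st.2 x
        (st.1 ++ [PySem.Set.len seen], seen))
      ([0], PySem.Set.empty)
  let right := bp.1.reverse
  let st :=
    (PySem.List.pyRange 0 ((topping.length : Int) - 1) 1).foldl
      (fun (st : Int × PySem.Set Int) i =>
        let left := PySem.Set.add st.2 (PySem.List.pyGetD topping i 0)
        let answer := if PySem.Set.len left == PySem.List.pyGetD right (i + 1) 0
                      then st.1 + 1 else st.1
        (answer, left))
      (0, PySem.Set.empty)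
  st.1

-- ===== PRECONDITION & SPEC =====
def Spec_solution (topping : List Int) (out : Int) : Prop := out = solution_alt topping
instance (topping : List Int) (out : Int) : Decidable (Spec_solution topping out) := by unfold Spec_solution; infer_instance

-- ===== CLAIM (what is proved, stated in full; the proofs are below) =====
def Claim_equal_solution : Prop := ∀ (topping : List Int), Dom_solution topping → Spec_solution topping (solution topping)

-- ===== LEMMAS AND PROOFS =====

-- distinct-count condition at cut i (left part topping[:i+1] vs right part topping[i+1:])
def pvCond (l : List Int) (i : Nat) : Bool :=
  (PySem.Set.ofList (l.take (i + 1))).length == (PySem.Set.ofList (l.drop (i + 1))).length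

-- the common reference value both programs compute
def pvRef (l : List Int) : Int := ((List.range (l.length - 1)).countP (pvCond l) : Int)

-- two nodup lists with the same members as a list s both have length (Set.ofList s).length
lemma pv_len_of_mem_iff {ks s : List Int} (hnd : ks.Nodup) (hm : ∀ x, x ∈ ks ↔ x ∈ s) :
    ks.length = (PySem.Set.ofList s).length := by
  have hperm : ks.Perm (PySem.Set.ofList s) :=
    (List.perm_ext_iff_of_nodup hnd (PySem.Set.nodup_ofList s)).mpr
      (fun a => by rw [hm a, PySem.Set.mem_ofList])
  exact hperm.length_eq

-- the branchy counter update of A is the canonical insert-getD-add-one update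
lemma pv_branchy_insert (d : PySem.Dict Int Int) (e : Int) :
    (if d.contains e then d.insert e (d.getD e 0 + 1) else d.insert e 1)
      = d.insert e (d.getD e 0 + 1) := by
  by_cases h : d.contains e
  · simp [h]
  · have h' : d.contains e = false := by simpa using h
    simp [h', PySem.Dict.getD_of_not_contains d 0 h']

lemma pv_branchy_insert' (d : PySem.Dict Int Int) (e : Int) :
    (if !(d.contains e) then d.insert e 1 else d.insert e (d.getD e 0 + 1))
      = d.insert e (d.getD e 0 + 1) := by
  rcases h : d.contains e with _ | _
  · simp [PySem.Dict.getD_of_not_contains d 0 h]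
  · simp

lemma pv_first_fold (l : List Int) :
    l.foldl (fun d e =>
      if d.contains e then d.insert e (d.getD e 0 + 1) else d.insert e 1)
      PySem.Dict.empty = PySem.Dict.counter l := by
  have hf : (fun (d : PySem.Dict Int Int) e =>
      if d.contains e then d.insert e (d.getD e 0 + 1) else d.insert e 1)
      = fun d e => d.insert e (d.getD e 0 + 1) := by
    funext d e; exact pv_branchy_insert d e
  rw [hf, PySem.Dict.foldl_insert_getD_add_one_eq_counter]

-- erase on a Dict: lookups away from the erased key are unchanged, the key is gone
lemma pv_find?_filter (items : List (Int × Int)) (k x : Int) (hxk : x ≠ k) :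
    (items.filter (fun p => !(p.1 == k))).find? (fun p => p.1 == x)
      = items.find? (fun p => p.1 == x) := by
  induction items with
  | nil => rfl
  | cons p rest ih =>
    by_cases hpk : p.1 = k
    · have hpx : (p.1 == x) = false := by
        simp only [beq_eq_false_iff_ne]; exact fun h => hxk (h ▸ hpk)
      have hkx : (k == x) = false := by simp only [beq_eq_false_iff_ne]; exact fun h => hxk h.symm
      simp [hpk, hkx, ih]
    · by_cases hpx : p.1 = x <;> simp [List.filter_cons, hpk, hpx, ih, if_neg hxk]

lemma pv_get?_erase (d : PySem.Dict Int Int) (k x : Int) :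
    (d.erase k).get? x = if x = k then none else d.get? x := by
  by_cases hxk : x = k
  · subst hxk
    simp only [PySem.Dict.erase, PySem.Dict.get?]
    rw [List.find?_eq_none.mpr]
    · rfl
    · intro p hp
      simp only [List.mem_filter, Bool.not_eq_eq_eq_not, Bool.not_true] at hp
      simp [hp.2]
  · simp only [PySem.Dict.erase, PySem.Dict.get?, if_neg hxk]
    rw [pv_find?_filter _ _ _ hxk]

lemma pv_getD_erase (d : PySem.Dict Int Int) (k x v : Int) :
    (d.erase k).getD x v = if x = k then v else d.getD x v := by
  simp [PySem.Dict.getD, pv_get?_erase]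
  split <;> rfl

lemma pv_keys_erase (d : PySem.Dict Int Int) (k : Int) :
    (d.erase k).keys = d.keys.filter (fun x => !(x == k)) := by
  rcases d with ⟨items⟩
  induction items with
  | nil => rfl
  | cons p rest ih =>
    by_cases hpk : p.1 = k <;>
      simp_all [PySem.Dict.erase, PySem.Dict.keys]

lemma pv_size_eq_keys_length (d : PySem.Dict Int Int) : d.size = d.keys.length := by
  simp [PySem.Dict.size, PySem.Dict.keys]

-- ===== A-side loop invariant =====

def pvStepA (st : Int × List Int × List Int × PySem.Dict Int Int × PySem.Dict Int Int) :
    Int × List Int × List Int × PySem.Dict Int Int × PySem.Dict Int Int :=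
  let answer := st.1
  let slice1 := st.2.1
  let slice2 := st.2.2.1
  let dic1 := st.2.2.2.1
  let dic2 := st.2.2.2.2
  let front := slice2.headD 0
  let slice2 := slice2.tail
  let slice1 := slice1 ++ [front]
  let dic1 := if !(dic1.contains front) then dic1.insert front 1
              else dic1.insert front (dic1.getD front 0 + 1)
  let dic2 := dic2.modify front 0 (· - 1)
  let dic2 := if dic2.getD front 0 == 0 then dic2.erase front else dic2
  let answer := if dic1.size == dic2.size then answer + 1 else answer
  (answer, slice1, slice2, dic1, dic2)

lemma pv_foldl_const {α : Type} (f : (Int × List Int × List Int × PySem.Dict Int Int × PySem.Dict Int Int) → _) (r : List α) (s) :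
    r.foldl (fun s _ => f s) s = f^[r.length] s := by
  induction r generalizing s with
  | nil => rfl
  | cons a r ih => simp [List.foldl_cons, ih, Function.iterate_succ_apply]

lemma pv_A_loop (l : List Int) (k : Nat) (hk : k + 1 ≤ l.length) :
    ∃ d2 : PySem.Dict Int Int,
      pvStepA^[k] (0, [], l, PySem.Dict.empty, PySem.Dict.counter l)
        = (((List.range k).countP (pvCond l) : Int), l.take k, l.drop k,
            PySem.Dict.counter (l.take k), d2)
      ∧ (∀ x, d2.getD x 0 = ((l.drop k).count x : Int))
      ∧ d2.keys.Nodup ∧ (∀ x, x ∈ d2.keys ↔ x ∈ l.drop k) := by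
  induction k with
  | zero =>
    refine ⟨PySem.Dict.counter l, rfl, fun x => by simp [PySem.Dict.getD_counter], ?_, ?_⟩
    · simp only [PySem.Dict.keys_counter]
      exact PySem.Set.nodup_ofList l
    · intro x; simp [PySem.Dict.keys_counter, PySem.Set.mem_ofList]
  | succ k ih =>
    obtain ⟨d2, hst, hgetD, hnd, hmem⟩ := ih (by omega)
    have hkl : k < l.length := by omega
    have hdrop : l.drop k = l[k] :: l.drop (k + 1) := List.drop_eq_getElem_cons hkl
    have hfront : (l.drop k).headD 0 = l[k] := by rw [hdrop]; rfl
    have htail : (l.drop k).tail = l.drop (k + 1) := by rw [hdrop]; rfl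
    have htake : l.take k ++ [l[k]] = l.take (k + 1) := by
      rw [List.take_add_one, List.getElem?_eq_getElem hkl]; rfl
    have hdic1 : (if !((PySem.Dict.counter (l.take k)).contains l[k])
          then (PySem.Dict.counter (l.take k)).insert l[k] 1
          else (PySem.Dict.counter (l.take k)).insert l[k]
                ((PySem.Dict.counter (l.take k)).getD l[k] 0 + 1))
        = PySem.Dict.counter (l.take (k + 1)) := by
      rw [pv_branchy_insert', ← htake, PySem.Dict.counter_append_singleton]; rfl
    have hfmem : l[k] ∈ l.drop k := by rw [hdrop]; exact List.mem_cons_self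
    have hcontains : d2.contains l[k] = true :=
      (PySem.Dict.contains_iff_mem_keys d2 l[k]).mpr ((hmem _).mpr hfmem)
    have hm2 : ∀ x, (d2.modify l[k] 0 (· - 1)).getD x 0 = ((l.drop (k + 1)).count x : Int) := by
      intro x
      rw [PySem.Dict.getD_modify]
      split_ifs with hx
      · subst hx
        rw [hgetD, hdrop, List.count_cons_self]; push_cast; ring
      · rw [hgetD, hdrop]
        rw [List.count_cons_of_ne (fun h => hx h.symm)]
    have hkeysm2 : (d2.modify l[k] 0 (· - 1)).keys = d2.keys := by
      rw [PySem.Dict.keys_modify, PySem.Dict.keys_insert_of_contains _ _ hcontains]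
    rw [Function.iterate_succ_apply', hst]
    by_cases hf : l[k] ∈ l.drop (k + 1)
    · -- the key survives in the suffix: no deletion
      have hcond2 : (((d2.modify l[k] 0 (· - 1)).getD l[k] 0) == 0) = false := by
        rw [hm2]
        have : 0 < (l.drop (k + 1)).count l[k] := List.count_pos_iff.mpr hf
        simp only [beq_eq_false_iff_ne]
        intro hc
        omega
      have hmem' : ∀ x, x ∈ (d2.modify l[k] 0 (· - 1)).keys ↔ x ∈ l.drop (k + 1) := by
        intro x
        rw [hkeysm2, hmem, hdrop, List.mem_cons]
        constructor
        · rintro (rfl | h) <;> [exact hf; exact h]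
        · exact Or.inr
      have hnd' : (d2.modify l[k] 0 (· - 1)).keys.Nodup := by rw [hkeysm2]; exact hnd
      have hsizeEq : ((PySem.Dict.counter (l.take (k + 1))).size
            == (d2.modify l[k] 0 (· - 1)).size) = pvCond l k := by
        rw [pv_size_eq_keys_length, pv_size_eq_keys_length, PySem.Dict.keys_counter,
          pv_len_of_mem_iff hnd' hmem']
        rfl
      refine ⟨d2.modify l[k] 0 (· - 1), ?_, hm2, hnd', hmem'⟩
      simp only [pvStepA, hfront, htail, hdic1, htake, hcond2, Bool.false_eq_true, if_false,
        hsizeEq, Prod.mk.injEq, and_true]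
      rcases h : pvCond l k with _ | _ <;>
        simp [List.range_succ, List.countP_append, h]
    · -- last copy of the key leaves the suffix: it is deleted
      have hzero : (l.drop (k + 1)).count l[k] = 0 := List.count_eq_zero.mpr hf
      have hcond2 : (((d2.modify l[k] 0 (· - 1)).getD l[k] 0) == 0) = true := by
        rw [hm2, hzero]; rfl
      have hgetD' : ∀ x, ((d2.modify l[k] 0 (· - 1)).erase l[k]).getD x 0
          = ((l.drop (k + 1)).count x : Int) := by
        intro x
        rw [pv_getD_erase]
        split_ifs with hx
        · subst hx; rw [hzero]; rfl
        · exact hm2 x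
      have hkeys' : ((d2.modify l[k] 0 (· - 1)).erase l[k]).keys
          = d2.keys.filter (fun x => !(x == l[k])) := by
        rw [pv_keys_erase, hkeysm2]
      have hnd' : ((d2.modify l[k] 0 (· - 1)).erase l[k]).keys.Nodup := by
        rw [hkeys']; exact hnd.filter _
      have hmem' : ∀ x, x ∈ ((d2.modify l[k] 0 (· - 1)).erase l[k]).keys ↔ x ∈ l.drop (k + 1) := by
        intro x
        rw [hkeys', List.mem_filter]
        simp only [Bool.not_eq_eq_eq_not, Bool.not_true, beq_eq_false_iff_ne]
        constructor
        · rintro ⟨hx, hne⟩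
          have := (hmem x).mp hx
          rw [hdrop, List.mem_cons] at this
          rcases this with rfl | h
          · exact absurd rfl hne
          · exact h
        · intro hx
          refine ⟨(hmem x).mpr (by rw [hdrop]; exact List.mem_cons_of_mem _ hx), ?_⟩
          rintro rfl
          exact hf hx
      have hsizeEq : ((PySem.Dict.counter (l.take (k + 1))).size
            == ((d2.modify l[k] 0 (· - 1)).erase l[k]).size) = pvCond l k := by
        rw [pv_size_eq_keys_length, pv_size_eq_keys_length, PySem.Dict.keys_counter,
          pv_len_of_mem_iff hnd' hmem']
        rfl
      refine ⟨(d2.modify l[k] 0 (· - 1)).erase l[k], ?_, hgetD', hnd', hmem'⟩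
      simp only [pvStepA, hfront, htail, hdic1, htake, hcond2, if_true,
        hsizeEq, Prod.mk.injEq, and_true]
      rcases h : pvCond l k with _ | _ <;>
        simp [List.range_succ, List.countP_append, h]

theorem pv_A_ref (l : List Int) : solution l = pvRef l := by
  have h0 : solution l = ((PySem.List.pyRange 0 ((l.length : Int) - 1) 1).foldl
      (fun s _ => pvStepA s) (0, [], l, PySem.Dict.empty, PySem.Dict.counter l)).1 := by
    rw [← pv_first_fold l]
    rfl
  rw [h0, pv_foldl_const pvStepA, PySem.List.length_pyRange_one]
  have hn : (((l.length : Int) - 1) - 0).toNat = l.length - 1 := by omega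
  rw [hn]
  rcases Nat.eq_zero_or_pos l.length with h | h
  · have hnil : l = [] := List.length_eq_zero_iff.mp h
    subst hnil; rfl
  · obtain ⟨d2, hst, -, -, -⟩ := pv_A_loop l (l.length - 1) (by omega)
    rw [hst]
    rfl

-- ===== B-side lemmas =====

lemma pv_B_back (ys : List Int) (acc : List Int) (seen : PySem.Set Int) :
    ys.foldl (fun (st : List Int × PySem.Set Int) x =>
        let seen := PySem.Set.add st.2 x
        (st.1 ++ [PySem.Set.len seen], seen)) (acc, seen)
      = (acc ++ (List.range ys.length).map
            (fun j => PySem.Set.len (seen.update (ys.take (j + 1)))), seen.update ys) := by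
  induction ys generalizing acc seen with
  | nil => simp [PySem.Set.update_nil]
  | cons y ys ih =>
    rw [List.foldl_cons]
    simp only []
    rw [ih]
    refine Prod.ext ?_ (by simp [PySem.Set.update_cons])
    simp only [List.length_cons, List.range_succ_eq_map, List.map_cons, List.map_map]
    simp [PySem.Set.update_cons, PySem.Set.update_nil, List.append_assoc, Function.comp]

lemma pv_B_fwd (l right' : List Int)
    (hr : ∀ j : Nat, j + 1 ≤ l.length - 1 →
      PySem.List.pyGetD right' ((j : Int) + 1) 0 = ((PySem.Set.ofList (l.drop (j + 1))).length : Int))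
    (k : Nat) (hk : k ≤ l.length - 1) :
    (List.range k).foldl (fun (st : Int × PySem.Set Int) (j : Nat) =>
        (if PySem.Set.len (PySem.Set.add st.2 (PySem.List.pyGetD l ((j : Int)) 0))
              == PySem.List.pyGetD right' ((j : Int) + 1) 0
         then st.1 + 1 else st.1,
         PySem.Set.add st.2 (PySem.List.pyGetD l ((j : Int)) 0))) (0, ([] : PySem.Set Int))
      = (((List.range k).countP (pvCond l) : Int), PySem.Set.ofList (l.take k)) := by
  induction k with
  | zero => simp
  | succ k ih =>
    have hk1 : k ≤ l.length - 1 := by omega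
    have hkl : k < l.length := by omega
    rw [List.range_succ, List.foldl_append, ih hk1]
    simp only [List.foldl_cons, List.foldl_nil]
    have hget : PySem.List.pyGetD l ((k : Int)) 0 = l[k] := by
      rw [PySem.List.pyGetD_natCast, List.getD_eq_getElem l 0 hkl]
    have hleft : PySem.Set.add (PySem.Set.ofList (l.take k)) l[k]
        = PySem.Set.ofList (l.take (k + 1)) := by
      rw [← PySem.Set.ofList_append_singleton]
      congr 1
      rw [List.take_add_one, List.getElem?_eq_getElem hkl]
      rfl
    have hcond : (PySem.Set.len (PySem.Set.ofList (l.take (k + 1)))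
          == PySem.List.pyGetD right' ((k : Int) + 1) 0) = pvCond l k := by
      rw [hr k (by omega), pvCond, PySem.Set.len]
      rcases h : ((PySem.Set.ofList (l.take (k + 1))).length
          == (PySem.Set.ofList (l.drop (k + 1))).length) with _ | _
      · simp only [beq_eq_false_iff_ne] at h
        simp only [beq_eq_false_iff_ne]
        exact_mod_cast h
      · simp only [beq_iff_eq] at h
        simp [h]
    simp only [hget, hleft, hcond]
    rcases h : pvCond l k with _ | _ <;>
      simp [List.countP_append, h]

theorem pv_B_ref (l : List Int) : solution_alt l = pvRef l := by
  simp only [solution_alt]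
  rw [pv_B_back]
  simp only [PySem.Set.empty_eq, PySem.Set.update_nil_left, List.length_reverse]
  rw [List.reverse_append, List.reverse_singleton]
  rw [PySem.List.pyRange_one]
  simp only [Int.sub_zero, zero_add]
  rw [List.foldl_map]
  have hn : ((l.length : Int) - 1).toNat = l.length - 1 := by omega
  rw [hn]
  have hr : ∀ j : Nat, j + 1 ≤ l.length - 1 →
      PySem.List.pyGetD
        (((List.range l.length).map
            (fun j => PySem.Set.len (PySem.Set.ofList (l.reverse.take (j + 1))))).reverse ++ [0])
        ((j : Int) + 1) 0
        = ((PySem.Set.ofList (l.drop (j + 1))).length : Int) := by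
    intro j hj
    have hn2 : j + 2 ≤ l.length := by omega
    have hcast : ((j : Int) + 1) = (((j + 1 : Nat)) : Int) := by push_cast; ring
    rw [hcast, PySem.List.pyGetD_natCast]
    rw [List.getD_eq_getElem _ 0 (by simp; omega)]
    rw [List.getElem_append_left (by simp; omega)]
    rw [List.getElem_reverse]
    simp only [List.getElem_map, List.getElem_range, List.length_map, List.length_range]
    have hidx : l.length - 1 - (j + 1) + 1 = l.length - (j + 1) := by omega
    rw [hidx, List.take_reverse]
    have h2 : l.length - (l.length - (j + 1)) = j + 1 := by omega
    rw [h2, PySem.Set.len]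
    norm_cast
    exact pv_len_of_mem_iff (PySem.Set.nodup_ofList _)
      (fun x => by simp [PySem.Set.mem_ofList])
  rw [pv_B_fwd l _ hr (l.length - 1) le_rfl]
  rfl

-- ===== VERDICT (by name: the statement is the Claim_ definition above) =====
theorem solution_spec : Claim_equal_solution := by
  intro topping _
  unfold Spec_solution
  rw [pv_A_ref, pv_B_ref]
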